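-- pv_equiv track=rewrite | github.com/1xiaosongz/lll | 5860.py | group_array
-- ===== SOURCE A (Python) =====
-- def group_array(arr,file_size, group_size=3200):#6S  的改成6400
--     if not arr:
--         return [[] for _ in range(file_size)]
--
--         # 初始化所有组为空列表
--     groups = [[] for _ in range(file_size)]
--
--     # 将元素分配到对应的组并进行调整
--     for num in arr:
--         group_index = int(num // group_size)
--         # 确保索引在范围内
--         if 0 <= group_index < file_size:
--             adjusted_value = num - group_size * group_index
--             groups[group_index].append(adjusted_value)
--     return groups
-- ===== SOURCE B (Python) =====
-- def group_array(arr, file_size, group_size=3200):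
--     # per-group rescan: collect each group's members directly
--     return [[num - group_size * i for num in arr if int(num // group_size) == i]
--             for i in range(file_size)]
-- ===== Notes on version B (the rewrite author's own statement) =====
-- stated objective: simpler
-- what changed: Replaces A's single mutating pass that appends into pre-allocated buckets with a nested comprehension that, for each group index i, rescans arr to collect its members; the bounds check and the empty-arr early return disappear.
import Mathlib
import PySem

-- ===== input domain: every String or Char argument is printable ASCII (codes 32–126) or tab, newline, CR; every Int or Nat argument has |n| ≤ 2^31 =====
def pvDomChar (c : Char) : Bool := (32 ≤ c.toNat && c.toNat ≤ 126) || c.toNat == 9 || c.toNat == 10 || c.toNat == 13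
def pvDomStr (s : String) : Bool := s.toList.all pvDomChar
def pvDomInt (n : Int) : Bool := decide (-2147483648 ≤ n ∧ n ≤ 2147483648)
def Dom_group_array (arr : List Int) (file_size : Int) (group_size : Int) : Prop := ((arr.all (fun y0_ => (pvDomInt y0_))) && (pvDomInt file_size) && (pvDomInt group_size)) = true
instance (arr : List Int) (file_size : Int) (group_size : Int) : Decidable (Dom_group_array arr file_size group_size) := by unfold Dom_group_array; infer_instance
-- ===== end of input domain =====

-- B replaces A's one mutating bucket-filling pass with a per-group rescan comprehension (simpler, not faster).

-- ===== PORT A =====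
-- one loop step of A: compute the group index, and if in range append the adjusted value to that bucket
def pvStepA (file_size : Int) (group_size : Int) (groups : List (List Int)) (num : Int) : List (List Int) :=
  let gi := PySem.Int.floordiv num group_size
  if 0 ≤ gi ∧ gi < file_size then
    groups.set gi.toNat (groups.getD gi.toNat [] ++ [num - group_size * gi])
  else groups

def group_array (arr : List Int) (file_size : Int) (group_size : Int) : List (List Int) :=
  if arr = [] then (PySem.List.pyRange 0 file_size 1).map (fun _ => ([] : List Int))
  else arr.foldl (pvStepA file_size group_size) ((PySem.List.pyRange 0 file_size 1).map (fun _ => ([] : List Int)))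

-- ===== PORT B =====
def group_array_alt (arr : List Int) (file_size : Int) (group_size : Int) : List (List Int) :=
  (PySem.List.pyRange 0 file_size 1).map (fun i =>
    arr.filterMap (fun num =>
      if PySem.Int.floordiv num group_size = i then some (num - group_size * i) else none))

-- ===== PRECONDITION & SPEC =====
-- Pre_ excludes exactly the inputs where Python A hits 'num // 0' (ZeroDivisionError): nonempty arr with group_size = 0.
def Pre_group_array (arr : List Int) (file_size : Int) (group_size : Int) : Prop :=
  arr = [] ∨ group_size ≠ 0
instance (arr : List Int) (file_size : Int) (group_size : Int) : Decidable (Pre_group_array arr file_size group_size) := by unfold Pre_group_array; infer_instance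
def pvWitness_group_array : List Int × Int × Int := ([0, 5, 7, -2], 3, 3)

def Spec_group_array (arr : List Int) (file_size : Int) (group_size : Int) (out : List (List Int)) : Prop := out = group_array_alt arr file_size group_size
instance (arr : List Int) (file_size : Int) (group_size : Int) (out : List (List Int)) : Decidable (Spec_group_array arr file_size group_size out) := by unfold Spec_group_array; infer_instance

-- ===== CLAIM (what is proved, stated in full; the proofs are below) =====
def Claim_equal_group_array : Prop := ∀ (arr : List Int) (file_size : Int) (group_size : Int), Dom_group_array arr file_size group_size → Pre_group_array arr file_size group_size → Spec_group_array arr file_size group_size (group_array arr file_size group_size)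

-- ===== LEMMAS AND PROOFS =====

-- the per-index contribution of arr to bucket i (= one inner comprehension of B)
def pvBucket (group_size : Int) (arr : List Int) (i : Int) : List Int :=
  arr.filterMap (fun num =>
    if PySem.Int.floordiv num group_size = i then some (num - group_size * i) else none)

lemma pvStepA_length (fs gs : Int) (G : List (List Int)) (num : Int) :
    (pvStepA fs gs G num).length = G.length := by
  unfold pvStepA
  by_cases hc : (0 : Int) ≤ PySem.Int.floordiv num gs ∧ PySem.Int.floordiv num gs < fs <;> simp [hc]

lemma foldl_stepA_length (fs gs : Int) (arr : List Int) (G : List (List Int)) :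
    (arr.foldl (pvStepA fs gs) G).length = G.length := by
  induction arr generalizing G with
  | nil => rfl
  | cons num rest ih => simp [List.foldl, ih, pvStepA_length]

lemma foldl_stepA_getD (fs gs : Int) (arr : List Int) :
    ∀ (G : List (List Int)), fs ≤ (G.length : Int) →
    ∀ (i : Nat), i < G.length → ((i : Int) < fs) →
      (arr.foldl (pvStepA fs gs) G).getD i [] = G.getD i [] ++ pvBucket gs arr i := by
  induction arr with
  | nil => intro G _ i _ _; simp [pvBucket]
  | cons num rest ih =>
    intro G hlen i hi hifs
    have hstep : (pvStepA fs gs G num).length = G.length := pvStepA_length fs gs G num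
    have h1 := ih (pvStepA fs gs G num) (by rw [hstep]; exact hlen) i (by rw [hstep]; exact hi) hifs
    rw [List.foldl_cons, h1]
    unfold pvStepA pvBucket
    by_cases hc : (0 : Int) ≤ PySem.Int.floordiv num gs ∧ PySem.Int.floordiv num gs < fs
    · simp only [hc]
      by_cases heq : PySem.Int.floordiv num gs = (i : Int)
      · have htn : (PySem.Int.floordiv num gs).toNat = i := by omega
        rw [htn]
        simp [List.getD, List.getElem?_set_self (by omega), heq]
      · have hne : (PySem.Int.floordiv num gs).toNat ≠ i := by omega
        simp [List.getD, List.getElem?_set_ne hne, heq]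
    · simp only [hc, if_false]
      have heq : PySem.Int.floordiv num gs ≠ (i : Int) := by
        intro h; exact hc ⟨by omega, by omega⟩
      simp [heq]

lemma group_array_eq_alt (arr : List Int) (fs gs : Int) :
    group_array arr fs gs = group_array_alt arr fs gs := by
  unfold group_array group_array_alt
  by_cases harr : arr = []
  · subst harr
    simp
  · simp only [harr, if_false]
    set G : List (List Int) := (PySem.List.pyRange 0 fs 1).map (fun _ => ([] : List Int)) with hG
    have hGlen : G.length = (fs - 0).toNat := by
      simp [hG, PySem.List.length_pyRange_one]
    apply List.ext_getElem
    · simp [foldl_stepA_length, hGlen, PySem.List.length_pyRange_one]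
    · intro i h1 h2
      have hiG : i < G.length := by rw [foldl_stepA_length] at h1; exact h1
      have hifs : (i : Int) < fs := by
        have := hiG; rw [hGlen] at this; omega
      have hfsG : fs ≤ (G.length : Int) := by rw [hGlen]; omega
      have hgd := foldl_stepA_getD fs gs arr G hfsG i hiG hifs
      have hGi : G.getD i [] = [] := by
        rw [List.getD_eq_getElem _ _ hiG]
        simp [hG]
      have hleft : (arr.foldl (pvStepA fs gs) G)[i] = (arr.foldl (pvStepA fs gs) G).getD i [] := by
        rw [List.getD_eq_getElem _ _ h1]
      rw [hleft, hgd, hGi, List.nil_append]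
      have hfs' : i < (fs - 0).toNat := by omega
      simp [List.getElem_map, PySem.List.getElem_pyRange_one, pvBucket]

-- ===== VERDICT (by name: the statement is the Claim_ definition above) =====
theorem group_array_spec : Claim_equal_group_array := by
  intro arr fs gs _ _
  unfold Spec_group_array
  exact group_array_eq_alt arr fs gs
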